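-- pv_equiv track=rewrite | github.com/zach-wade/AiStockTrader | ai_trader_old/src/main/scanners/catalysts/sector_scanner.py | _determine_rotation_type
-- ===== SOURCE A (Python) =====
-- def _determine_rotation_type(top_sectors: list[str]) -> str:
--     """Determine market rotation type based on leading sectors."""
--     # Simplified rotation detection
--     early_cycle_sectors = {"Financials", "Industrials", "Consumer Discretionary"}
--     mid_cycle_sectors = {"Technology", "Materials", "Energy"}
--     late_cycle_sectors = {"Energy", "Materials", "Financials"}
--     defensive_sectors = {"Utilities", "Consumer Staples", "Healthcare"}
--
--     # Count sector types in top performers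
--     early_count = sum(1 for s in top_sectors if s in early_cycle_sectors)
--     mid_count = sum(1 for s in top_sectors if s in mid_cycle_sectors)
--     late_count = sum(1 for s in top_sectors if s in late_cycle_sectors)
--     defensive_count = sum(1 for s in top_sectors if s in defensive_sectors)
--
--     # Determine dominant rotation
--     if early_count >= 2:
--         return "early_cycle"
--     elif mid_count >= 2:
--         return "mid_cycle"
--     elif late_count >= 2:
--         return "late_cycle"
--     elif defensive_count >= 2:
--         return "recession"
--     else:
--         return "neutral"
-- ===== SOURCE B (Python) =====
-- def _determine_rotation_type(top_sectors: list[str]) -> str: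
--     """Determine market rotation type based on leading sectors."""
--     # One sector->categories mapping and a single pass over top_sectors.
--     mapping = {
--         "Financials": ("early", "late"),
--         "Industrials": ("early",),
--         "Consumer Discretionary": ("early",),
--         "Technology": ("mid",),
--         "Materials": ("mid", "late"),
--         "Energy": ("mid", "late"),
--         "Utilities": ("defensive",),
--         "Consumer Staples": ("defensive",),
--         "Healthcare": ("defensive",),
--     }
--     counts = {"early": 0, "mid": 0, "late": 0, "defensive": 0}
--     for s in top_sectors:
--         for cat in mapping.get(s, ()):
--             counts[cat] += 1
--     if counts["early"] >= 2:
--         return "early_cycle"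
--     if counts["mid"] >= 2:
--         return "mid_cycle"
--     if counts["late"] >= 2:
--         return "late_cycle"
--     if counts["defensive"] >= 2:
--         return "recession"
--     return "neutral"
-- ===== Notes on version B (the rewrite author's own statement) =====
-- stated objective: alternative
-- what changed: Replaced four separate membership-count passes over top_sectors (one per cycle-category set) by a single sector-to-categories mapping and one pass that increments all category counters at once.
import Mathlib
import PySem

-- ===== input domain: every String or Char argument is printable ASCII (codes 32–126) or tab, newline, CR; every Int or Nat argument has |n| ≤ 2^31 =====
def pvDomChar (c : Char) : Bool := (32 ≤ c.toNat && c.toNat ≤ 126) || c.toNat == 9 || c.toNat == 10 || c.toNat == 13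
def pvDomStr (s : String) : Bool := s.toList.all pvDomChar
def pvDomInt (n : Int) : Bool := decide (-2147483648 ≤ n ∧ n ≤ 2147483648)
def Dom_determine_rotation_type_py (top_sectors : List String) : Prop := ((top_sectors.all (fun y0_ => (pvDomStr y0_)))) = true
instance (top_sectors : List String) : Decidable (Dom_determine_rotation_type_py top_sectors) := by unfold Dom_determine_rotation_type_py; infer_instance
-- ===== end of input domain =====

-- B replaces A's four separate membership-count passes by one sector→categories map and a single pass (alternative decomposition, same result).


-- ===== PORT A =====
def earlyCycleSectors : PySem.Set String := PySem.Set.ofList ["Financials", "Industrials", "Consumer Discretionary"]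
def midCycleSectors : PySem.Set String := PySem.Set.ofList ["Technology", "Materials", "Energy"]
def lateCycleSectors : PySem.Set String := PySem.Set.ofList ["Energy", "Materials", "Financials"]
def defensiveSectors : PySem.Set String := PySem.Set.ofList ["Utilities", "Consumer Staples", "Healthcare"]

def determine_rotation_type_py (top_sectors : List String) : String :=
  let early_count := top_sectors.foldl (fun acc s => if PySem.Set.contains earlyCycleSectors s then acc + 1 else acc) (0 : Int)
  let mid_count := top_sectors.foldl (fun acc s => if PySem.Set.contains midCycleSectors s then acc + 1 else acc) (0 : Int)
  let late_count := top_sectors.foldl (fun acc s => if PySem.Set.contains lateCycleSectors s then acc + 1 else acc) (0 : Int)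
  let defensive_count := top_sectors.foldl (fun acc s => if PySem.Set.contains defensiveSectors s then acc + 1 else acc) (0 : Int)
  if early_count ≥ 2 then "early_cycle"
  else if mid_count ≥ 2 then "mid_cycle"
  else if late_count ≥ 2 then "late_cycle"
  else if defensive_count ≥ 2 then "recession"
  else "neutral"

-- ===== PORT B =====
-- dict sector → tuple of categories (insertion-order assoc list; keys distinct, so List.lookup = dict.get)
def rotMapping : List (String × List String) :=
  [("Financials", ["early", "late"]),
   ("Industrials", ["early"]),
   ("Consumer Discretionary", ["early"]),
   ("Technology", ["mid"]),
   ("Materials", ["mid", "late"]),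
   ("Energy", ["mid", "late"]),
   ("Utilities", ["defensive"]),
   ("Consumer Staples", ["defensive"]),
   ("Healthcare", ["defensive"])]

-- counts dict with fixed keys early/mid/late/defensive, kept as a 4-tuple (e, m, l, d)
def bumpCat (c : Nat × Nat × Nat × Nat) (cat : String) : Nat × Nat × Nat × Nat :=
  if cat == "early" then (c.1 + 1, c.2.1, c.2.2.1, c.2.2.2)
  else if cat == "mid" then (c.1, c.2.1 + 1, c.2.2.1, c.2.2.2)
  else if cat == "late" then (c.1, c.2.1, c.2.2.1 + 1, c.2.2.2)
  else if cat == "defensive" then (c.1, c.2.1, c.2.2.1, c.2.2.2 + 1)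
  else c

def determine_rotation_type_py_alt (top_sectors : List String) : String :=
  let counts := top_sectors.foldl
    (fun c s => ((rotMapping.lookup s).getD []).foldl bumpCat c) (0, 0, 0, 0)
  if counts.1 ≥ 2 then "early_cycle"
  else if counts.2.1 ≥ 2 then "mid_cycle"
  else if counts.2.2.1 ≥ 2 then "late_cycle"
  else if counts.2.2.2 ≥ 2 then "recession"
  else "neutral"

-- ===== PRECONDITION & SPEC =====
def Spec_determine_rotation_type_py (top_sectors : List String) (out : String) : Prop := out = determine_rotation_type_py_alt top_sectors
instance (top_sectors : List String) (out : String) : Decidable (Spec_determine_rotation_type_py top_sectors out) := by unfold Spec_determine_rotation_type_py; infer_instance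

-- ===== CLAIM (what is proved, stated in full; the proofs are below) =====
def Claim_equal_determine_rotation_type_py : Prop := ∀ (top_sectors : List String), Dom_determine_rotation_type_py top_sectors → Spec_determine_rotation_type_py top_sectors (determine_rotation_type_py top_sectors)

-- ===== LEMMAS AND PROOFS =====

-- one element's contribution in B equals its 0/1 contributions to A's four counters
lemma bump_step (s : String) (e m l d : Nat) :
    ((rotMapping.lookup s).getD []).foldl bumpCat (e, m, l, d) =
      (e + (if PySem.Set.contains earlyCycleSectors s then 1 else 0),
       m + (if PySem.Set.contains midCycleSectors s then 1 else 0),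
       l + (if PySem.Set.contains lateCycleSectors s then 1 else 0),
       d + (if PySem.Set.contains defensiveSectors s then 1 else 0)) := by
  by_cases h1 : s = "Financials"
  · subst h1; simp [rotMapping, bumpCat, earlyCycleSectors, midCycleSectors, lateCycleSectors, defensiveSectors]
  by_cases h2 : s = "Industrials"
  · subst h2; simp [rotMapping, bumpCat, List.lookup, earlyCycleSectors, midCycleSectors, lateCycleSectors, defensiveSectors]
  by_cases h3 : s = "Consumer Discretionary"
  · subst h3; simp [rotMapping, bumpCat, List.lookup, earlyCycleSectors, midCycleSectors, lateCycleSectors, defensiveSectors]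
  by_cases h4 : s = "Technology"
  · subst h4; simp [rotMapping, bumpCat, List.lookup, earlyCycleSectors, midCycleSectors, lateCycleSectors, defensiveSectors]
  by_cases h5 : s = "Materials"
  · subst h5; simp [rotMapping, bumpCat, List.lookup, earlyCycleSectors, midCycleSectors, lateCycleSectors, defensiveSectors]
  by_cases h6 : s = "Energy"
  · subst h6; simp [rotMapping, bumpCat, List.lookup, earlyCycleSectors, midCycleSectors, lateCycleSectors, defensiveSectors]
  by_cases h7 : s = "Utilities"
  · subst h7; simp [rotMapping, bumpCat, List.lookup, earlyCycleSectors, midCycleSectors, lateCycleSectors, defensiveSectors]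
  by_cases h8 : s = "Consumer Staples"
  · subst h8; simp [rotMapping, bumpCat, List.lookup, earlyCycleSectors, midCycleSectors, lateCycleSectors, defensiveSectors]
  by_cases h9 : s = "Healthcare"
  · subst h9; simp [rotMapping, bumpCat, List.lookup, earlyCycleSectors, midCycleSectors, lateCycleSectors, defensiveSectors]
  ·
    have g1 : (s == "Financials") = false := by simp [h1]
    have g2 : (s == "Industrials") = false := by simp [h2]
    have g3 : (s == "Consumer Discretionary") = false := by simp [h3]
    have g4 : (s == "Technology") = false := by simp [h4]
    have g5 : (s == "Materials") = false := by simp [h5]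
    have g6 : (s == "Energy") = false := by simp [h6]
    have g7 : (s == "Utilities") = false := by simp [h7]
    have g8 : (s == "Consumer Staples") = false := by simp [h8]
    have g9 : (s == "Healthcare") = false := by simp [h9]
    simp [rotMapping, List.lookup, earlyCycleSectors, midCycleSectors, lateCycleSectors,
      defensiveSectors, PySem.Set.contains, g1, g2, g3, g4, g5, g6, g7, g8, g9]
    exact ⟨⟨h1, h2, h3⟩, ⟨h4, h5, h6⟩, ⟨h6, h5, h1⟩, h7, h8, h9⟩

-- B's single fold computes A's four counters (shifted by any start state)
lemma fold_counts (xs : List String) : ∀ (e m l d : Nat),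
    xs.foldl (fun c s => ((rotMapping.lookup s).getD []).foldl bumpCat c) (e, m, l, d) =
      (e + xs.countP (PySem.Set.contains earlyCycleSectors),
       m + xs.countP (PySem.Set.contains midCycleSectors),
       l + xs.countP (PySem.Set.contains lateCycleSectors),
       d + xs.countP (PySem.Set.contains defensiveSectors)) := by
  induction xs with
  | nil => intro e m l d; simp
  | cons x xs ih =>
    intro e m l d
    simp only [List.foldl_cons, bump_step, ih, List.countP_cons]
    refine Prod.ext ?_ (Prod.ext ?_ (Prod.ext ?_ ?_)) <;> simp <;> split_ifs <;> omega

-- ===== VERDICT (by name: the statement is the Claim_ definition above) =====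
theorem determine_rotation_type_py_spec : Claim_equal_determine_rotation_type_py := by
  intro xs _
  unfold Spec_determine_rotation_type_py determine_rotation_type_py determine_rotation_type_py_alt
  simp only [fold_counts, PySem.List.foldl_count_if, Nat.zero_add]
  split_ifs <;> first | rfl | omega
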